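-- pv_equiv track=rewrite | github.com/Neytrinoo/practice_1_semester | main.py | check_input_data
-- ===== SOURCE A (Python) =====
-- def check_input_data(data):  # проверка правильности введенных данных
--     data = data.split('\n')
--     try:
--         int(data[0])
--     except ValueError:
--         return False
--     k = 0
--     while k < len(data) - 1:
--         try:
--             # считаем, правильное ли количество шагов указано
--             input_count_steps, find_count_steps = int(data[k]), 0
--             for i in range(int(data[k])):
--                 try:
--                     now_step = list(map(float, data[k + i + 1].split()))
--                     # если в описывающем перемещение случае не 4 параметра
--                     if len(now_step) != 4:
--                         return False
--                     if i == 0 and now_step[0] != 0:  # если начальное время не равно 0 секундам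
--                         return False
--                     find_count_steps += 1
--                 except ValueError:
--                     return False
--             if input_count_steps != find_count_steps:
--                 return False
--             k += 1 + find_count_steps
--         except ValueError:  # если какое-либо из преобразований вызывало ошибку,
--             # значит, введенные данные некорректны
--             return False
--     try:
--         if k != len(data) - 1 or int(data[k]) != 0:  # последним значением должен быть ноль
--             return False
--     except ValueError:
--         return False
--     return True
-- ===== SOURCE B (Python) =====
-- # Recursive block-chunk validator: classify the first body line as a header, slice
-- # off that block, check its steps with a boolean helper, recurse on the rest.
-- def _as_int(s):
--     try:
--         return int(s)
--     except ValueError: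
--         return None
--
--
-- def _step_ok(line, first):
--     # a step line: exactly 4 float parameters, and time 0 on the first step of a block
--     try:
--         xs = [float(t) for t in line.split()]
--     except ValueError:
--         return False
--     return len(xs) == 4 and (not first or xs[0] == 0)
--
--
-- def _blocks(body):
--     if not body:
--         return True
--     n = _as_int(body[0])
--     if n is None or n < 0 or n > len(body) - 1:
--         return False
--     for j, ln in enumerate(body[1 : n + 1]):
--         if not _step_ok(ln, j == 0):
--             return False
--     return _blocks(body[n + 1 :])
--
--
-- def check_input_data(data):
--     lines = data.split('\n')
--     if _as_int(lines[0]) is None: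
--         return False
--     if not _blocks(lines[:-1]):
--         return False
--     return _as_int(lines[-1]) == 0
-- ===== Notes on version B (the rewrite author's own statement) =====
-- stated objective: simpler
-- what changed: Replaces A's index-arithmetic while loop with nested try/except and an inner for over range(int(data[k])) by a recursive block-chunk validator: slice the body into header+block with list slicing, check the block with a boolean step predicate, recurse on the remaining suffix.
import Mathlib
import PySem

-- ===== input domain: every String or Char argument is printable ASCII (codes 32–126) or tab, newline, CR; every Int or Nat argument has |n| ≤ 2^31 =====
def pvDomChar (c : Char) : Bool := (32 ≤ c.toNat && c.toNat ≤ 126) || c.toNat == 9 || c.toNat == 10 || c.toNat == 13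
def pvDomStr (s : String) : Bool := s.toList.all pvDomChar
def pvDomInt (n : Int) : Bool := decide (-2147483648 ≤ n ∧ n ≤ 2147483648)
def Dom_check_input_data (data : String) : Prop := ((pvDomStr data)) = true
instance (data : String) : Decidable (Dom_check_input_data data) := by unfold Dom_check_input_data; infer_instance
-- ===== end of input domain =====

-- B replaces A's index-arithmetic while loop (nested try/except, inner for over range(int(data[k])))
-- by a recursive block-chunk validator: slice header + block off the body, check the block with a
-- boolean step predicate, recurse on the remaining suffix (objective: simpler; return value only).
-- Where Python A raises an uncaught IndexError (a block header promising more step lines than the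
-- input has) its port yields False; B's bound check returns False on those inputs as well, so the
-- equality is proved with no precondition.

-- ===== PORT A =====
-- A-side port of Python's float(token) restricted to what check_input_data observes:
-- none = ValueError, some b with b = (float(token) == 0)  (float() on a str never raises anything but ValueError;
-- zero iff mantissa is 0 or the exact decimal value is ≤ 2^-1075, the round-to-nearest-even threshold of 0.0).
-- Exact for tokens produced by str.split() (no whitespace inside a token).
def pvIsDigit (c : Char) : Bool := decide ('0' ≤ c ∧ c ≤ '9')

-- Python 3 underscore rule in numeric literals: every '_' must sit between two digits.
def pvUnderscoreOk : Option Char → List Char → Bool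
  | _, [] => true
  | prev, c :: rest =>
    if c = '_' then
      (match prev with | some p => pvIsDigit p | none => false)
      && (match rest with | d :: _ => pvIsDigit d | [] => false)
      && pvUnderscoreOk (some c) rest
    else pvUnderscoreOk (some c) rest

def pvDigVal (cs : List Char) : Nat := cs.foldl (fun a c => a * 10 + (c.toNat - 48)) 0

def pvDigitsVal? (cs : List Char) : Option Nat :=
  if cs ≠ [] ∧ cs.all pvIsDigit then some (pvDigVal cs) else none

-- mantissa "intpart[.fracpart]" → (digits value, number of fractional digits)
def pvMant? (cs : List Char) : Option (Nat × Nat) :=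
  let ip := cs.takeWhile (fun c => c ≠ '.')
  let rest := cs.dropWhile (fun c => c ≠ '.')
  if ip.all pvIsDigit then
    match rest with
    | [] => if ip = [] then none else some (pvDigVal ip, 0)
    | _ :: fp =>
      if fp.all pvIsDigit ∧ (ip ≠ [] ∨ fp ≠ []) then some (pvDigVal (ip ++ fp), fp.length)
      else none
  else none

def pvExpVal? (cs : List Char) : Option Int :=
  match cs with
  | '+' :: ds => (pvDigitsVal? ds).map (fun n => (n : Int))
  | '-' :: ds => (pvDigitsVal? ds).map (fun n => -(n : Int))
  | ds => (pvDigitsVal? ds).map (fun n => (n : Int))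

-- is m * 10^e == 0.0 after correctly-rounded (ties-to-even) conversion to an IEEE double
def pvZeroVal (m : Nat) (e : Int) : Bool :=
  if m = 0 then true
  else
    let e2 : Int := e + (Nat.log 10 m + 1)
    if e2 ≤ -324 then true
    else if e2 = -323 then decide (m * 2 ^ 1075 ≤ 10 ^ (-e).toNat)
    else false

def pvFloatZero? (cs : List Char) : Option Bool :=
  let rest := match cs with
    | '+' :: r => r
    | '-' :: r => r
    | r => r
  let low := rest.map PySem.Chars.lowerChar
  if low = ['i','n','f'] ∨ low = ['i','n','f','i','n','i','t','y'] ∨ low = ['n','a','n'] then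
    some false   -- inf/nan: parses, compares nonzero
  else if pvUnderscoreOk none rest then
    let cs2 := rest.filter (fun c => c ≠ '_')
    let mant := cs2.takeWhile (fun c => ¬ (c = 'e' ∨ c = 'E'))
    let erest := cs2.dropWhile (fun c => ¬ (c = 'e' ∨ c = 'E'))
    match pvMant? mant with
    | none => none
    | some (m, fl) =>
      match erest with
      | [] => some (pvZeroVal m (-(fl : Int)))
      | _ :: ex =>
        match pvExpVal? ex with
        | none => none
        | some ev => some (pvZeroVal m (ev - fl))
  else none

-- list(map(float, line.split())) → none = ValueError, some flags with flags[j] = (value j == 0)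
def pvStepFlags? (line : List Char) : Option (List Bool) :=
  (PySem.Chars.split₀ line).mapM pvFloatZero?

-- A's inner `for i in range(stop)` loop; some b = early `return b`, none = loop completed.
-- data[k+i+1] out of range is Python's uncaught IndexError; the port yields `some false` there (B returns false there too).
def pvInnerA (lines : List (List Char)) (k : Nat) (i stop : Nat) : Option Bool :=
  if i < stop then
    match PySem.List.pyGet? lines ((k + i + 1 : Nat) : Int) with
    | none => some false   -- IndexError in Python; B's bound check also yields false here
    | some line =>
      match pvStepFlags? line with
      | none => some false                                   -- ValueError → return False
      | some flags =>
        if flags.length ≠ 4 then some false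
        else if i = 0 ∧ flags.getD 0 true = false then some false
        else pvInnerA lines k (i + 1) stop
  else none
termination_by stop - i

-- A's outer `while k < len(data) - 1` loop plus the final-line check.
def pvOuterA (lines : List (List Char)) (k : Nat) : Bool :=
  if _h : k + 1 < lines.length then
    match PySem.Int.ofChars? (lines.getD k []) with
    | none => false                                          -- ValueError → return False
    | some cnt =>
      match pvInnerA lines k 0 cnt.toNat with
      | some b => b
      | none =>
        if cnt = ((cnt.toNat : Nat) : Int) then pvOuterA lines (k + 1 + cnt.toNat)
        else false                                           -- input_count_steps != find_count_steps
  else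
    if (k : Int) ≠ (lines.length : Int) - 1 then false
    else
      match PySem.Int.ofChars? (lines.getD k []) with
      | none => false
      | some v => v == 0

def check_input_data (data : String) : Bool :=
  let lines := PySem.Chars.splitOn data.toList ['\n']
  match PySem.Int.ofChars? (lines.getD 0 []) with
  | none => false
  | some _ => pvOuterA lines 0

-- ===== PORT B =====
-- B-side port of float(token), written as an independent left-to-right scanner suite
-- (same observable semantics as A's pvFloatZero?; proved equal below in bFloat_eq).
def bVal : List Char → Nat → Nat
  | [], acc => acc
  | ch :: tl, acc => bVal tl (10 * acc + (ch.toNat - 48))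

def bDigits (tok : List Char) : Bool := !tok.isEmpty && tok.all Char.isDigit

-- break a token at the first separator the predicate accepts
def bBreak (sep : Char → Bool) : List Char → List Char × List Char
  | [] => ([], [])
  | ch :: tl =>
    cond (sep ch) ([], ch :: tl)
      (let pieces := bBreak sep tl
       (ch :: pieces.1, pieces.2))

-- underscore rule, scanned with the previous character carried along
def bUndGo : Char → List Char → Bool
  | _, [] => true
  | prev, ch :: tl => (ch != '_' || (prev.isDigit && (tl.headD ' ').isDigit)) && bUndGo ch tl

def bUndOk (tok : List Char) : Bool :=
  tok.headD ' ' != '_' && bUndGo (tok.headD ' ') tok.tail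

def bMant? (tok : List Char) : Option (Nat × Nat) :=
  match bBreak (fun ch => ch == '.') tok with
  | (whole, []) => cond (bDigits whole) (some (bVal whole 0, 0)) none
  | (whole, _ :: frac) =>
    cond (whole.all Char.isDigit && frac.all Char.isDigit && !(whole.isEmpty && frac.isEmpty))
      (some (bVal (whole ++ frac) 0, frac.length)) none

def bExp? (tok : List Char) : Option Int :=
  let sd : Int × List Char :=
    match tok with
    | '+' :: tl => (1, tl)
    | '-' :: tl => (-1, tl)
    | tl => (1, tl)
  cond (bDigits sd.2) (some (sd.1 * (bVal sd.2 0 : Int))) none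

-- is mant * 10^exp zero after correctly-rounded conversion to an IEEE double
-- (B's own spelling of the threshold test; equal to A's pvZeroVal, see bZero_eq)
def bZero (mant : Nat) (exp : Int) : Bool :=
  mant == 0 ||
    (let dd : Int := exp + (Nat.log 10 mant + 1)
     decide (dd ≤ -324) || (dd == -323 && decide (mant * 2 ^ 1075 ≤ 10 ^ (-exp).toNat)))

def bFloatBody (body : List Char) : Option Bool :=
  let low := PySem.Chars.lower body
  cond (low == ['i','n','f'] || low == ['i','n','f','i','n','i','t','y'] || low == ['n','a','n'])
    (some false)
    (cond (bUndOk body)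
      (match bBreak (fun ch => ch == 'e' || ch == 'E') (body.filter (· != '_')) with
       | (mant, ex) =>
         (bMant? mant).bind fun mf =>
           match ex with
           | [] => some (bZero mf.1 (-(mf.2 : Int)))
           | _ :: et => (bExp? et).map fun ev => bZero mf.1 (ev - (mf.2 : Int)))
      none)

def bFloat? (tok : List Char) : Option Bool :=
  match tok with
  | '+' :: tl => bFloatBody tl
  | '-' :: tl => bFloatBody tl
  | tl => bFloatBody tl

-- _step_ok(line, first): exactly 4 floats, time 0 on the first step of a block
def bStepOk (line : List Char) (first : Bool) : Bool :=
  ((PySem.Chars.split₀ line).mapM bFloat?).elim false fun zs =>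
    zs.length == 4 && (!first || zs.getD 0 false)

def bSteps : List (List Char) → Bool → Bool
  | [], _ => true
  | ln :: tl, first => bStepOk ln first && bSteps tl false

-- _blocks(body): recursive chunk consumption
def bBlocks : List (List Char) → Bool
  | [] => true
  | hd :: tl =>
    match PySem.Int.ofChars? hd with
    | none => false
    | some n =>
      cond (n < 0 || (tl.length : Int) < n) false
        (bSteps (tl.take n.toNat) true && bBlocks (tl.drop n.toNat))
termination_by l => l.length
decreasing_by simp [List.length_drop]

def check_input_data_alt (data : String) : Bool :=
  let lines := PySem.Chars.splitOn data.toList ['\n']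
  (PySem.Int.ofChars? (lines.headD [])).isSome
    && (bBlocks lines.dropLast
    && (PySem.Int.ofChars? (lines.getD (lines.length - 1) []) == some 0))

-- ===== PRECONDITION & SPEC =====
def Spec_check_input_data (data : String) (out : Bool) : Prop := out = check_input_data_alt data
instance (data : String) (out : Bool) : Decidable (Spec_check_input_data data out) := by
  unfold Spec_check_input_data; infer_instance

-- ===== CLAIM (what is proved, stated in full; the proofs are below) =====
def Claim_equal_check_input_data : Prop := ∀ (data : String), Dom_check_input_data data → Spec_check_input_data data (check_input_data data)

-- ===== LEMMAS AND PROOFS =====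
-- ---- bridge: B's float scanner = A's float parser ----
lemma bIsDigit_eq (c : Char) : Char.isDigit c = pvIsDigit c := by
  unfold Char.isDigit pvIsDigit
  rw [Bool.decide_and]
  rfl

lemma bVal_eq (cs : List Char) : ∀ a, bVal cs a = cs.foldl (fun a c => a * 10 + (c.toNat - 48)) a := by
  induction cs with
  | nil => intro a; simp [bVal]
  | cons c r ih => intro a; simp [bVal, List.foldl, ih, Nat.mul_comm]

lemma bDigits_eq (cs : List Char) :
    (if bDigits cs then some (bVal cs 0) else none) = pvDigitsVal? cs := by
  simp only [bDigits, pvDigitsVal?, bVal_eq, pvDigVal]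
  by_cases h : cs = []
  · subst h; simp
  · simp only [h, ne_eq, not_false_eq_true, true_and, List.isEmpty_eq_false_iff, h,
      not_false_eq_true, Bool.not_true]
    have : (!cs.isEmpty) = true := by simp [List.isEmpty_iff, h]
    rw [this]
    have : cs.all Char.isDigit = cs.all pvIsDigit := by
      simp [List.all_eq, bIsDigit_eq]
    rw [this]
    by_cases h2 : cs.all pvIsDigit = true <;> simp [h2]

lemma bBreak_spec (p : Char → Bool) (l : List Char) :
    bBreak p l = (l.takeWhile (fun c => !p c), l.dropWhile (fun c => !p c)) := by
  induction l with
  | nil => simp [bBreak]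
  | cons c r ih =>
    cases h : p c with
    | true => simp [bBreak, h, List.takeWhile, List.dropWhile]
    | false => simp [bBreak, h, List.takeWhile, List.dropWhile, ih]

lemma bUndGo_eq (l : List Char) : ∀ p, bUndGo p l = pvUnderscoreOk (some p) l := by
  induction l with
  | nil => intro p; rfl
  | cons c r ih =>
    intro p
    by_cases h : c = '_'
    · subst h
      have hsp : (' ').isDigit = false := rfl
      cases r with
      | nil => simp [bUndGo, pvUnderscoreOk, hsp]
      | cons d r' =>
        have e1 : bUndGo p ('_' :: d :: r')
            = ((('_' : Char) != '_' || (p.isDigit && (List.headD (d :: r') ' ').isDigit))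
              && bUndGo '_' (d :: r')) := rfl
        have e2 : pvUnderscoreOk (some p) ('_' :: d :: r')
            = ((pvIsDigit p && pvIsDigit d) && pvUnderscoreOk (some '_') (d :: r')) := by
          rw [pvUnderscoreOk, if_pos rfl]
        rw [e1, e2, ih '_']
        simp only [bne_self_eq_false, Bool.false_or, List.headD_cons, bIsDigit_eq]
    · simp [bUndGo, pvUnderscoreOk, h, ih, bne_iff_ne]

lemma bUndOk_eq (l : List Char) : bUndOk l = pvUnderscoreOk none l := by
  cases l with
  | nil => rfl
  | cons c r =>
    by_cases h : c = '_'
    · subst h; simp [bUndOk, pvUnderscoreOk]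
    · simp [bUndOk, pvUnderscoreOk, h, bUndGo_eq, bne_iff_ne]

lemma bMant_eq (cs : List Char) : bMant? cs = pvMant? cs := by
  simp only [bMant?, pvMant?, bBreak_spec]
  have hpred : (fun c => !(fun c => c == '.') c) = (fun c : Char => decide ¬(c = '.')) := by
    funext c; by_cases h : c = '.' <;> simp [h]
  rw [hpred]
  have hall : ∀ (l : List Char), l.all Char.isDigit = l.all pvIsDigit := by
    intro l; simp [List.all_eq, bIsDigit_eq]
  set ip := cs.takeWhile (fun c : Char => decide ¬(c = '.')) with hip
  set rest := cs.dropWhile (fun c : Char => decide ¬(c = '.')) with hrest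
  cases rest with
  | nil =>
    simp only [bDigits, hall, bVal_eq]
    by_cases h : ip = []
    · simp [h, pvDigVal]
    · have hne : (!ip.isEmpty) = true := by simp [List.isEmpty_iff, h]
      by_cases h2 : ip.all pvIsDigit = true
      · simp [hne, h2, h, pvDigVal]
      · simp [hne, h2, h]
  | cons d fp =>
    simp only [hall, bVal_eq]
    by_cases h2 : ip.all pvIsDigit = true
    · simp only [h2, Bool.true_and, if_true]
      by_cases h3 : fp.all pvIsDigit = true
      · by_cases h4 : ip = [] ∧ fp = []
        · simp [h3, h4.1, h4.2, List.isEmpty_iff]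
        · have : (¬ (ip.isEmpty && fp.isEmpty) = true) := by
            simp only [Bool.and_eq_true, List.isEmpty_iff]; exact h4
          have hcond : (fp.all pvIsDigit && !(ip.isEmpty && fp.isEmpty)) = true := by
            simp only [h3, Bool.true_and, Bool.not_eq_true']
            simp only [Bool.and_eq_true, List.isEmpty_iff] at this ⊢
            cases hie : ip.isEmpty <;> cases hfe : fp.isEmpty <;> simp_all [List.isEmpty_iff]
          rw [hcond, cond_true]
          have : (fp.all pvIsDigit = true ∧ (ip ≠ [] ∨ fp ≠ [])) := by
            refine ⟨h3, ?_⟩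
            by_contra hc
            push_neg at hc
            exact h4 ⟨hc.1, hc.2⟩
          rw [if_pos this]
          simp [pvDigVal]
      · simp [h3]
    · simp [h2]

lemma bExp_eq (cs : List Char) : bExp? cs = pvExpVal? cs := by
  cases cs with
  | nil => simp [bExp?, pvExpVal?, ← bDigits_eq, bDigits]
  | cons c r =>
    by_cases h1 : c = '+'
    · subst h1
      simp only [bExp?, pvExpVal?, ← bDigits_eq]
      by_cases h : bDigits r = true <;> simp [h]
    · by_cases h2 : c = '-'
      · subst h2
        simp only [bExp?, pvExpVal?, ← bDigits_eq]
        by_cases h : bDigits r = true <;> simp [h]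
      · have hsd : (match c :: r with
            | '+' :: r => ((1 : Int), r)
            | '-' :: r => ((-1 : Int), r)
            | r => ((1 : Int), r)) = (1, c :: r) := by
          split <;> simp_all
        have hm : pvExpVal? (c :: r) = (pvDigitsVal? (c :: r)).map (fun n => (n : Int)) := by
          unfold pvExpVal?
          split <;> simp_all
        rw [hm]
        simp only [bExp?, hsd, ← bDigits_eq]
        by_cases h : bDigits (c :: r) = true <;> simp [h]

lemma bZero_eq : bZero = pvZeroVal := by
  funext mant exp
  unfold bZero pvZeroVal
  by_cases h0 : mant = 0
  · simp [h0]
  · by_cases h1 : exp + (Nat.log 10 mant + 1) ≤ -324 <;>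
      by_cases h2 : exp + (Nat.log 10 mant + 1) = -323 <;>
        simp [h0, h1, h2]

lemma bFloatBody_eq (r : List Char) :
    bFloatBody r =
      (let low := r.map PySem.Chars.lowerChar
       if low = ['i','n','f'] ∨ low = ['i','n','f','i','n','i','t','y'] ∨ low = ['n','a','n'] then
         some false
       else if pvUnderscoreOk none r then
         let cs2 := r.filter (fun c => c ≠ '_')
         let mant := cs2.takeWhile (fun c => ¬ (c = 'e' ∨ c = 'E'))
         let erest := cs2.dropWhile (fun c => ¬ (c = 'e' ∨ c = 'E'))
         match pvMant? mant with
         | none => none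
         | some (m, fl) =>
           match erest with
           | [] => some (pvZeroVal m (-(fl : Int)))
           | _ :: ex =>
             match pvExpVal? ex with
             | none => none
             | some ev => some (pvZeroVal m (ev - fl))
       else none) := by
  simp only [bFloatBody, PySem.Chars.lower, bZero_eq]
  have hcond : ((r.map PySem.Chars.lowerChar == ['i','n','f'] ||
      r.map PySem.Chars.lowerChar == ['i','n','f','i','n','i','t','y'] ||
      r.map PySem.Chars.lowerChar == ['n','a','n']) = true)
      ↔ (r.map PySem.Chars.lowerChar = ['i','n','f'] ∨
         r.map PySem.Chars.lowerChar = ['i','n','f','i','n','i','t','y'] ∨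
         r.map PySem.Chars.lowerChar = ['n','a','n']) := by
    simp [or_assoc]
  by_cases h : (r.map PySem.Chars.lowerChar = ['i','n','f'] ∨
      r.map PySem.Chars.lowerChar = ['i','n','f','i','n','i','t','y'] ∨
      r.map PySem.Chars.lowerChar = ['n','a','n'])
  · rw [hcond.mpr h, cond_true, if_pos h]
  · have hb : (List.map PySem.Chars.lowerChar r == ['i','n','f'] ||
        List.map PySem.Chars.lowerChar r == ['i','n','f','i','n','i','t','y'] ||
        List.map PySem.Chars.lowerChar r == ['n','a','n']) = false := by
      rw [Bool.eq_false_iff]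
      intro hx
      exact h (hcond.mp hx)
    rw [hb, cond_false, if_neg h]
    rw [bUndOk_eq]
    by_cases h2 : pvUnderscoreOk none r = true
    · rw [h2, cond_true, if_pos rfl]
      have hfil : r.filter (· != '_') = r.filter (fun c => decide (c ≠ '_')) := by
        apply List.filter_congr
        intro x _
        by_cases hx : x = '_' <;> simp [hx]
      rw [hfil]
      rw [bBreak_spec]
      have hpred : (fun c => !(fun c : Char => c == 'e' || c == 'E') c)
          = (fun c : Char => decide ¬(c = 'e' ∨ c = 'E')) := by
        funext c
        by_cases h1 : c = 'e' <;> by_cases h2 : c = 'E' <;> simp [h1, h2]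
      rw [hpred, bMant_eq]
      cases pvMant? ((r.filter (fun c => decide (c ≠ '_'))).takeWhile
          (fun c : Char => decide ¬(c = 'e' ∨ c = 'E'))) with
      | none => simp
      | some mf =>
        obtain ⟨m, fl⟩ := mf
        cases ((r.filter (fun c => decide (c ≠ '_'))).dropWhile
            (fun c : Char => decide ¬(c = 'e' ∨ c = 'E'))) with
        | nil => simp
        | cons e0 ex =>
          simp only [Option.bind_some]
          rw [bExp_eq]
          cases pvExpVal? ex <;> simp
    · have h2f : pvUnderscoreOk none r = false := by
        rw [Bool.eq_false_iff]; exact h2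
      rw [h2f, cond_false, if_neg Bool.false_ne_true]

lemma bFloat_eq : bFloat? = pvFloatZero? := by
  funext cs
  unfold bFloat? pvFloatZero?
  cases cs with
  | nil => exact bFloatBody_eq []
  | cons c r =>
    by_cases h1 : c = '+'
    · subst h1; exact bFloatBody_eq r
    · by_cases h2 : c = '-'
      · subst h2; exact bFloatBody_eq r
      · have hA : (match c :: r with
            | '+' :: r => r
            | '-' :: r => r
            | r => r) = c :: r := by
          split <;> simp_all
        have hB : (match c :: r with
            | '+' :: r => bFloatBody r
            | '-' :: r => bFloatBody r
            | r => bFloatBody r) = bFloatBody (c :: r) := by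
          split <;> simp_all
        rw [hA, hB]
        exact bFloatBody_eq (c :: r)

lemma bStepFlags (l : List Char) : (PySem.Chars.split₀ l).mapM bFloat? = pvStepFlags? l := by
  rw [bFloat_eq]; rfl

-- ---- structural lemmas about the line list ----
lemma pv_drop_dropLast_cons (lines : List (List Char)) (k : Nat) (h : k + 1 < lines.length) :
    (lines.dropLast).drop k = lines.getD k [] :: (lines.dropLast).drop (k + 1) := by
  have hk : k < lines.dropLast.length := by simp [List.length_dropLast]; omega
  rw [List.drop_eq_getElem_cons hk]
  congr 1
  rw [List.getElem_dropLast, List.getD_eq_getElem]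

lemma pv_drop_dropLast_nil (lines : List (List Char)) (k : Nat) (h : lines.length ≤ k + 1) :
    (lines.dropLast).drop k = [] := by
  apply List.drop_eq_nil_of_le
  simp [List.length_dropLast]; omega

lemma pv_outer_dead (lines : List (List Char)) (k : Nat) (h : lines.length ≤ k) (_h1 : 1 ≤ lines.length) :
    pvOuterA lines k = false := by
  rw [pvOuterA]
  rw [dif_neg (by omega)]
  rw [if_pos (by omega)]

lemma pv_splitOn_go_ne_nil (sep : List Char) :
    ∀ (fuel : Nat) (s cur : List Char) (acc : List (List Char)),
      PySem.Chars.splitOn.go sep fuel s cur acc ≠ [] := by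
  intro fuel
  induction fuel with
  | zero => intro s cur acc; simp [PySem.Chars.splitOn.go]
  | succ f IH =>
    intro s cur acc
    cases s with
    | nil => simp [PySem.Chars.splitOn.go]
    | cons c rest =>
      rw [PySem.Chars.splitOn.go]
      split
      · exact IH _ _ _
      · exact IH _ _ _

lemma pv_splitOn_ne_nil (s sep : List Char) : PySem.Chars.splitOn s sep ≠ [] := by
  unfold PySem.Chars.splitOn
  exact pv_splitOn_go_ne_nil sep _ s [] []

-- B's result from position k onward: remaining blocks of the body, then the final-line check
def bTail (lines : List (List Char)) (k : Nat) : Bool :=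
  bBlocks ((lines.dropLast).drop k)
    && (PySem.Int.ofChars? (lines.getD (lines.length - 1) []) == some 0)

lemma bBlocks_nil : bBlocks [] = true := by rw [bBlocks]

lemma bBlocks_cons (hd : List Char) (tl : List (List Char)) :
    bBlocks (hd :: tl)
      = (match PySem.Int.ofChars? hd with
         | none => false
         | some n =>
           cond (n < 0 || (tl.length : Int) < n) false
             (bSteps (tl.take n.toNat) true && bBlocks (tl.drop n.toNat))) := by
  rw [bBlocks]

-- A's inner loop returns false on every path when the block overruns the final line
lemma pv_dead_inner (lines : List (List Char)) (k stop : Nat)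
    (hov : lines.length ≤ k + 1 + stop) (h1 : 1 ≤ lines.length) :
    ∀ m i, stop - i = m →
      (match pvInnerA lines k i stop with
       | some b => b
       | none => pvOuterA lines (k + 1 + stop)) = false := by
  intro m
  induction m with
  | zero =>
    intro i hi
    rw [pvInnerA, if_neg (by omega)]
    exact pv_outer_dead lines _ (by omega) h1
  | succ m ih =>
    intro i hi
    rw [pvInnerA, if_pos (by omega)]
    cases hg : PySem.List.pyGet? lines ((k + i + 1 : Nat) : Int) with
    | none => simp
    | some line =>
      cases hsf : pvStepFlags? line with
      | none => simp [hsf]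
      | some flags =>
        simp only [hsf]
        by_cases hlen : flags.length ≠ 4
        · rw [if_pos hlen]
        · rw [if_neg hlen]
          by_cases hcnd : i = 0 ∧ flags.getD 0 true = false
          · rw [if_pos hcnd]
          · rw [if_neg hcnd]
            exact ih (i + 1) (by omega)

-- A's inner loop over a block that stays inside the body = B's bSteps over the sliced chunk
lemma pv_inner_chunk (lines : List (List Char)) (k stop : Nat)
    (hst : k + stop + 2 ≤ lines.length)
    (HG : pvOuterA lines (k + 1 + stop) = bTail lines (k + 1 + stop)) :
    ∀ m i, stop - i = m → i ≤ stop →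
      (match pvInnerA lines k i stop with
       | some b => b
       | none => pvOuterA lines (k + 1 + stop))
      = (bSteps (((lines.dropLast).drop (k + 1 + i)).take (stop - i)) (decide (i = 0))
          && bTail lines (k + 1 + stop)) := by
  intro m
  induction m with
  | zero =>
    intro i hm hi
    have : i = stop := by omega
    subst this
    rw [pvInnerA, if_neg (by omega)]
    simp [bSteps, HG]
  | succ m ih =>
    intro i hm hi
    have hilt : i < stop := by omega
    rw [pvInnerA, if_pos hilt]
    rw [PySem.List.pyGet?_natCast]
    have hin : k + i + 1 < lines.length := by omega
    rw [List.getElem?_eq_getElem hin]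
    -- B side: expose the head of the chunk
    rw [pv_drop_dropLast_cons lines (k + 1 + i) (by omega)]
    have hgd : lines.getD (k + 1 + i) [] = lines[k + i + 1] := by
      have h12 : k + 1 + i = k + i + 1 := by omega
      rw [h12, List.getD_eq_getElem]
    rw [hgd]
    have htake : stop - i = (stop - (i + 1)) + 1 := by omega
    rw [htake, List.take_succ_cons]
    simp only [bSteps, bStepOk, bStepFlags]
    cases hsf : pvStepFlags? lines[k + i + 1] with
    | none => simp [hsf]
    | some flags =>
      simp only [hsf, Option.elim_some]
      by_cases hlen : flags.length ≠ 4
      · rw [if_pos hlen]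
        have : (flags.length == 4) = false := by simp [hlen]
        simp [this]
      · rw [if_neg hlen]
        have hlen4 : flags.length = 4 := by omega
        obtain ⟨a, rest, hfl⟩ : ∃ a rest, flags = a :: rest := by
          cases flags with
          | nil => simp at hlen4
          | cons a rest => exact ⟨a, rest, rfl⟩
        subst hfl
        by_cases hcnd : i = 0 ∧ (a :: rest).getD 0 true = false
        · rw [if_pos hcnd]
          have ha : a = false := by simpa using hcnd.2
          have hr3 : rest.length = 3 := by simpa using hlen4
          simp [hr3, ha, hcnd.1]
        · rw [if_neg hcnd]
          have hrec := ih (i + 1) (by omega) (by omega)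
          have harr : k + 1 + (i + 1) = k + 1 + i + 1 := by omega
          rw [harr] at hrec
          have hd : (decide (i + 1 = 0)) = false := by simp
          rw [hd] at hrec
          rw [hrec]
          have hok : ((a :: rest).length == 4 && (!decide (i = 0) || (a :: rest).getD 0 false)) = true := by
            by_cases hi0 : i = 0
            · have ha : a = true := by
                cases hv : a with
                | false => exact absurd ⟨hi0, by simp [hv]⟩ hcnd
                | true => rfl
              have hr3 : rest.length = 3 := by simpa using hlen4
              simp [hr3, ha]
            · have hr3 : rest.length = 3 := by simpa using hlen4
              simp [hr3, hi0]
          rw [hok]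
          simp [Bool.and_assoc]

-- main loop correspondence
lemma pv_main (lines : List (List Char)) (h1 : 1 ≤ lines.length) :
    ∀ d k, lines.length - k ≤ d → k < lines.length →
      pvOuterA lines k = bTail lines k := by
  intro d
  induction d with
  | zero => intro k h hk; omega
  | succ d IH =>
    intro k h hk
    by_cases hk1 : k + 1 < lines.length
    · rw [pvOuterA, dif_pos hk1]
      unfold bTail
      rw [pv_drop_dropLast_cons lines k hk1]
      rw [bBlocks_cons]
      cases hof : PySem.Int.ofChars? (lines.getD k []) with
      | none => simp
      | some n =>
        simp only []
        have hL : (List.drop (k + 1) lines.dropLast).length = lines.length - (k + 2) := by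
          simp [List.length_dropLast]
          omega
        rw [hL]
        rcases lt_trichotomy n 0 with hn | hn | hn
        · -- negative count: A runs an empty loop then fails the cast check; B's bound fails
          have hc : (decide (n < 0) || decide (((lines.length - (k + 2) : Nat) : Int) < n)) = true := by
            simp [hn]
          rw [hc, cond_true]
          have ht : n.toNat = 0 := by omega
          rw [ht, pvInnerA, if_neg (show ¬ (0 < 0) by omega)]
          simp only []
          rw [if_neg (show ¬ (n = ((0 : Nat) : Int)) by omega)]
          simp
        · -- zero count: empty block, move on to the next header
          subst hn
          rw [Int.toNat_zero]
          have hc : (decide ((0 : Int) < 0) || decide (((lines.length - (k + 2) : Nat) : Int) < 0)) = false := by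
            have h0 : ¬ (((lines.length - (k + 2) : Nat) : Int) < 0) := by omega
            simp [h0]
          rw [hc, cond_false]
          rw [pvInnerA, if_neg (show ¬ (0 < 0) by omega)]
          simp only []
          rw [if_pos (show (0 : Int) = ((0 : Nat) : Int) by simp)]
          have hIH := IH (k + 1) (by omega) (by omega)
          rw [show k + 1 + 0 = k + 1 from rfl, hIH]
          unfold bTail
          simp [bSteps]
        · by_cases hov : (((lines.length - (k + 2) : Nat) : Int) < n)
          · -- block overruns the body: A always ends in false, B's bound check fails
            have hc : (decide (n < 0) || decide (((lines.length - (k + 2) : Nat) : Int) < n)) = true := by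
              simp [hov]
            rw [hc, cond_true]
            have hdead := pv_dead_inner lines k n.toNat (by omega) h1 n.toNat 0 (by omega)
            cases hin : pvInnerA lines k 0 n.toNat with
            | some b =>
              have hb : b = false := by simpa [hin] using hdead
              simp [hin, hb]
            | none =>
              have hrest : pvOuterA lines (k + 1 + n.toNat) = false := by
                simpa [hin] using hdead
              rw [if_pos (show n = ((n.toNat : Nat) : Int) by omega)]
              simp [hin, hrest]
          · -- block inside the body: chunk lemma + induction on the rest
            have hc : (decide (n < 0) || decide (((lines.length - (k + 2) : Nat) : Int) < n)) = false := by
              simp only [Bool.or_eq_false_iff, decide_eq_false_iff_not]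
              constructor <;> omega
            rw [hc, cond_false]
            have hst : k + n.toNat + 2 ≤ lines.length := by omega
            have HG : pvOuterA lines (k + 1 + n.toNat) = bTail lines (k + 1 + n.toNat) :=
              IH (k + 1 + n.toNat) (by omega) (by omega)
            have hchunk := pv_inner_chunk lines k n.toNat hst HG n.toNat 0 rfl (by omega)
            simp only [Nat.add_zero, Nat.sub_zero, decide_true] at hchunk
            cases hin : pvInnerA lines k 0 n.toNat with
            | some b =>
              rw [hin] at hchunk
              simp only [] at hchunk
              simp only [bTail] at hchunk
              simp [hin, hchunk, Bool.and_assoc]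
            | none =>
              rw [hin] at hchunk
              simp only [] at hchunk
              simp only [bTail] at hchunk
              rw [if_pos (show n = ((n.toNat : Nat) : Int) by omega)]
              simp [hin, hchunk, Bool.and_assoc]
    · -- k = len - 1: final-line check on both sides
      rw [pvOuterA, dif_neg hk1]
      have hk2 : k = lines.length - 1 := by omega
      rw [if_neg (by omega)]
      unfold bTail
      rw [pv_drop_dropLast_nil lines k (by omega)]
      rw [bBlocks_nil]
      simp only [Bool.true_and, hk2]
      cases PySem.Int.ofChars? (lines.getD (lines.length - 1) []) with
      | none => simp
      | some v => simp

lemma pv_headD_getD (l : List (List Char)) : l.headD [] = l.getD 0 [] := by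
  cases l <;> rfl

lemma pv_ports_eq (data : String) : check_input_data data = check_input_data_alt data := by
  have hne : PySem.Chars.splitOn data.toList ['\n'] ≠ [] := pv_splitOn_ne_nil _ _
  have hlen : 1 ≤ (PySem.Chars.splitOn data.toList ['\n']).length :=
    List.length_pos_of_ne_nil hne
  unfold check_input_data check_input_data_alt
  simp only [pv_headD_getD]
  cases h0 : PySem.Int.ofChars? ((PySem.Chars.splitOn data.toList ['\n']).getD 0 []) with
  | none => simp
  | some v =>
    simp only [Option.isSome_some, Bool.true_and]
    have hm := pv_main (PySem.Chars.splitOn data.toList ['\n']) hlen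
      (PySem.Chars.splitOn data.toList ['\n']).length 0 (by omega) (by omega)
    rw [hm]
    unfold bTail
    rw [List.drop_zero]

-- ===== VERDICT (by name: the statement is the Claim_ definition above) =====
theorem check_input_data_spec : Claim_equal_check_input_data := by
  intro data _
  unfold Spec_check_input_data
  exact pv_ports_eq data
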